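-- pv_equiv track=rewrite | github.com/nusoff01/mlb-Player-Project | extract_state_data.py | convertToCanada
-- ===== SOURCE A (Python) =====
-- def convertToCanada(state_map):
--     provinces = ['AB', 'BC', 'MB', 'NB', 'NL', 'NT', 'NS', 'NU', 'ON', 'PE', 'QC', 'SK', 'YT']
--     num_in_province = 0
--     state_map["CAN"] = 0
--     for province in provinces:
--         try:
--             num_in_province = state_map[province]
--             state_map["CAN"] += num_in_province
--             state_map.pop(province, None)
--         except KeyError:
--             continue
--     return state_map
-- ===== SOURCE B (Python) =====
-- # B: drives the loop off the dict's own keys instead of the fixed province list: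
-- # one snapshot pass collects the provinces present, their values are summed, "CAN"
-- # is set to the total, and the collected keys are deleted. Mutates state_map in
-- # place like A and returns it.
-- PROVINCES = {'AB', 'BC', 'MB', 'NB', 'NL', 'NT', 'NS', 'NU', 'ON', 'PE', 'QC', 'SK', 'YT'}
--
-- def convertToCanada(state_map):
--     state_map["CAN"] = 0
--     found = [k for k in list(state_map) if k in PROVINCES]
--     state_map["CAN"] = sum(state_map[k] for k in found)
--     for k in found:
--         del state_map[k]
--     return state_map
-- ===== Notes on version B (the rewrite author's own statement) =====
-- stated objective: alternative
-- what changed: Instead of A's fixed 13-province probe loop that interleaves try/except lookups, running 'CAN' updates and pops, B takes one snapshot pass over the dict's own keys to collect the provinces present, sums their values with one sum(), sets 'CAN' once, and then deletes the collected keys.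
import Mathlib
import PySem

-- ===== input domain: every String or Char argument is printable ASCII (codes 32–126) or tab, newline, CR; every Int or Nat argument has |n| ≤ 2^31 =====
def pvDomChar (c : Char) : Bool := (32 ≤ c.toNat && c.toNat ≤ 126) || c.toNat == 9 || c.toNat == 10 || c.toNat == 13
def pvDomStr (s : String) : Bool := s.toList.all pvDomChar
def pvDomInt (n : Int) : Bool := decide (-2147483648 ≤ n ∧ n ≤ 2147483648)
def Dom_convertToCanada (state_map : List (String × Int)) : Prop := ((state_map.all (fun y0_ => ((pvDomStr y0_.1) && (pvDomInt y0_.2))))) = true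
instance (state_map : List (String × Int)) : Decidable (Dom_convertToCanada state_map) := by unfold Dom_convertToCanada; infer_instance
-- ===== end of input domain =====

-- B drives the loop off the dict's own keys (one snapshot pass collecting the provinces present,
-- one sum, then the deletions) instead of A's fixed 13-province probe loop; same return value.
-- Both Pythons mutate state_map in place; the equivalence proved here is about the return value.

-- ===== PORT A =====
def pvProvincesA : List String :=
  ["AB", "BC", "MB", "NB", "NL", "NT", "NS", "NU", "ON", "PE", "QC", "SK", "YT"]

-- one iteration of A's for-loop: try lookup (KeyError → continue), add to "CAN", pop the province
def pvStepA (d : PySem.Dict String Int) (province : String) : PySem.Dict String Int :=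
  match d.get? province with
  | some num_in_province => (d.insert "CAN" (d.getD "CAN" 0 + num_in_province)).erase province
  | none => d

def convertToCanada (state_map : List (String × Int)) : List (String × Int) :=
  (pvProvincesA.foldl pvStepA ((PySem.Dict.mk state_map).insert "CAN" 0)).items

-- ===== PORT B =====
def pvProvSet : PySem.Set String :=
  PySem.Set.ofList ["AB", "BC", "MB", "NB", "NL", "NT", "NS", "NU", "ON", "PE", "QC", "SK", "YT"]

def convertToCanada_alt (state_map : List (String × Int)) : List (String × Int) :=
  let d0 : PySem.Dict String Int := (PySem.Dict.mk state_map).insert "CAN" 0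
  let found := d0.keys.filter (fun k => pvProvSet.contains k)
  let d1 := d0.insert "CAN" ((found.map (fun k => d0.getD k 0)).sum)
  (found.foldl (fun d k => d.erase k) d1).items

-- ===== PRECONDITION & SPEC =====
-- Pre_ excludes association lists with duplicate keys: they do not represent any Python dict,
-- so no such input ever reaches A (whose argument is a dict).
def Pre_convertToCanada (state_map : List (String × Int)) : Prop :=
  (state_map.map Prod.fst).Nodup
instance (state_map : List (String × Int)) : Decidable (Pre_convertToCanada state_map) := by
  unfold Pre_convertToCanada; infer_instance

def pvWitness_convertToCanada : (List (String × Int)) := [("ON", 3), ("NY", 2)]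

def Spec_convertToCanada (state_map : List (String × Int)) (out : List (String × Int)) : Prop := out = convertToCanada_alt state_map
instance (state_map : List (String × Int)) (out : List (String × Int)) : Decidable (Spec_convertToCanada state_map out) := by unfold Spec_convertToCanada; infer_instance

-- ===== CLAIM (what is proved, stated in full; the proofs are below) =====
def Claim_equal_convertToCanada : Prop := ∀ (state_map : List (String × Int)), Dom_convertToCanada state_map → Pre_convertToCanada state_map → Spec_convertToCanada state_map (convertToCanada state_map)

-- ===== LEMMAS AND PROOFS =====

theorem pvItems_erase (d : PySem.Dict String Int) (k : String) :
    (d.erase k).items = d.items.filter (fun p => !(p.1 == k)) := rfl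

theorem pvContains_erase_of_ne (d : PySem.Dict String Int) {k p : String} (h : k ≠ p) :
    (d.erase p).contains k = d.contains k := by
  simp only [PySem.Dict.contains, pvItems_erase]
  induction d.items with
  | nil => rfl
  | cons a l ih =>
    by_cases hk : a.1 = k
    · simp [List.filter_cons, List.any_cons, hk, h]
    · by_cases ha : a.1 = p
      · simp [List.filter_cons, List.any_cons, hk, ha, ih, Ne.symm h]
      · simp [List.filter_cons, List.any_cons, hk, ha, ih]

theorem pvGet?_erase_of_ne (d : PySem.Dict String Int) {k p : String} (h : k ≠ p) :
    (d.erase p).get? k = d.get? k := by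
  simp only [PySem.Dict.get?, pvItems_erase]
  congr 1
  induction d.items with
  | nil => rfl
  | cons a l ih =>
    by_cases hk : a.1 = k
    · simp [List.filter_cons, List.find?_cons, hk, h]
    · by_cases ha : a.1 = p
      · simp [List.filter_cons, List.find?_cons, hk, ha, ih, Ne.symm h]
      · simp [List.filter_cons, List.find?_cons, hk, ha, ih]

theorem pvGetD_erase_of_ne (d : PySem.Dict String Int) {k p : String} (x : Int) (h : k ≠ p) :
    (d.erase p).getD k x = d.getD k x := by
  simp [PySem.Dict.getD, pvGet?_erase_of_ne d h]

theorem pvErase_of_not_contains (d : PySem.Dict String Int) (p : String)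
    (h : d.contains p = false) : d.erase p = d := by
  apply PySem.Dict.ext
  rw [pvItems_erase, List.filter_eq_self]
  intro x hx
  simp only [PySem.Dict.contains, List.any_eq_false] at h
  simpa using h x hx

theorem pvErase_insert_comm (d : PySem.Dict String Int) (v : Int) {k p : String} (h : k ≠ p) :
    (d.insert k v).erase p = (d.erase p).insert k v := by
  apply PySem.Dict.ext
  by_cases hc : d.contains k
  · rw [pvItems_erase]
    simp only [PySem.Dict.insert, hc, pvContains_erase_of_ne d h, if_pos, pvItems_erase]
    rw [List.filter_map]
    congr 1
    refine List.filter_congr (fun x _ => ?_)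
    by_cases hx : x.1 = k
    · simp [hx, h]
    · simp [hx, Ne.symm hx, List.contains_cons]
  · rw [pvItems_erase]
    simp only [PySem.Dict.insert, hc, pvContains_erase_of_ne d h, Bool.false_eq_true, if_neg,
      pvItems_erase, List.filter_append]
    simp [h]

theorem pvNodup_keys_erase (d : PySem.Dict String Int) (p : String) (h : d.keys.Nodup) :
    (d.erase p).keys.Nodup := by
  simp only [PySem.Dict.keys, pvItems_erase] at *
  exact List.Nodup.sublist (List.Sublist.map _ List.filter_sublist) h

theorem pvInsert_getD_self (d : PySem.Dict String Int) (k : String)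
    (hc : d.contains k = true) (hn : d.keys.Nodup) : d.insert k (d.getD k 0) = d := by
  apply PySem.Dict.ext
  simp only [PySem.Dict.insert, hc, if_pos]
  have hmap : ∀ x ∈ d.items,
      (fun p => if (p.1 == k) = true then (k, d.getD k 0) else p) x = id x := by
    rintro ⟨x1, x2⟩ hx
    by_cases hxk : x1 = k
    · have : d.getD k 0 = x2 := by
        have := PySem.Dict.getD_of_mem_items (d := d) (k := x1) (v := x2) hx hn 0
        rw [hxk] at this; exact this
      simp [hxk, this]
    · simp [hxk]
  rw [List.map_congr_left hmap, List.map_id]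

theorem pvFoldl_erase_items (l : List String) (d : PySem.Dict String Int) :
    (l.foldl (fun d k => d.erase k) d).items
      = d.items.filter (fun q => !(l.contains q.1)) := by
  induction l generalizing d with
  | nil => simp
  | cons a l ih =>
    rw [List.foldl_cons, ih, pvItems_erase, List.filter_filter]
    refine List.filter_congr (fun x _ => ?_)
    by_cases hx : x.1 = a
    · simp [hx]
    · simp [hx]

theorem pvFoldA (ps : List String) (d : PySem.Dict String Int)
    (hnd : d.keys.Nodup) (hC : d.contains "CAN" = true)
    (hps : "CAN" ∉ ps) (hpsnd : ps.Nodup) :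
    ps.foldl pvStepA d =
      ps.foldl (fun d k => d.erase k)
        (d.insert "CAN" (d.getD "CAN" 0 + (ps.map (fun p => d.getD p 0)).sum)) := by
  induction ps generalizing d with
  | nil =>
    simp only [List.foldl_nil, List.map_nil, List.sum_nil, add_zero]
    exact (pvInsert_getD_self d "CAN" hC hnd).symm
  | cons p ps ih =>
    have hpC : "CAN" ≠ p := fun h => hps (h ▸ List.mem_cons_self ..)
    have hps' : "CAN" ∉ ps := fun h => hps (List.mem_cons_of_mem _ h)
    have hpsnd' : ps.Nodup := hpsnd.of_cons
    rw [List.foldl_cons, List.foldl_cons]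
    cases hg : d.get? p with
    | none =>
      have hcp : d.contains p = false := (PySem.Dict.get?_eq_none_iff_contains d p).mp hg
      have h0 : d.getD p 0 = 0 := PySem.Dict.getD_of_not_contains d 0 hcp
      have hstep : pvStepA d p = d := by simp [pvStepA, hg]
      rw [hstep, ih d hnd hC hps' hpsnd']
      have hnc : (d.insert "CAN" (d.getD "CAN" 0 + ((p :: ps).map (fun p => d.getD p 0)).sum)).contains p = false := by
        rw [PySem.Dict.contains_insert]
        simp [hcp, beq_eq_false_iff_ne.mpr (Ne.symm hpC)]
      rw [pvErase_of_not_contains _ p hnc]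
      simp [h0]
    | some v =>
      have hv : d.getD p 0 = v := PySem.Dict.getD_of_get?_eq_some d 0 hg
      have hstep : pvStepA d p
          = (d.insert "CAN" (d.getD "CAN" 0 + v)).erase p := by simp [pvStepA, hg]
      set d' := (d.insert "CAN" (d.getD "CAN" 0 + v)).erase p with hd'
      have hnd' : d'.keys.Nodup :=
        pvNodup_keys_erase _ p (PySem.Dict.nodup_keys_insert d "CAN" _ hnd)
      have hC' : d'.contains "CAN" = true := by
        rw [hd', pvContains_erase_of_ne _ hpC]
        exact PySem.Dict.contains_insert_self d "CAN" _
      rw [hstep, ih d' hnd' hC' hps' hpsnd']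
      have hgC : d'.getD "CAN" 0 = d.getD "CAN" 0 + v := by
        rw [hd', pvGetD_erase_of_ne _ 0 hpC, PySem.Dict.getD_insert_self]
      have hmap : ps.map (fun q => d'.getD q 0) = ps.map (fun q => d.getD q 0) := by
        refine List.map_congr_left (fun q hq => ?_)
        have hqp : q ≠ p := fun h => (List.nodup_cons.mp hpsnd).1 (h ▸ hq)
        have hqC : q ≠ "CAN" := fun h => hps' (h ▸ hq)
        rw [hd', pvGetD_erase_of_ne _ 0 hqp, PySem.Dict.getD_insert_of_ne d _ 0 hqC]
      have hins : d'.insert "CAN" (d'.getD "CAN" 0 + (ps.map (fun q => d'.getD q 0)).sum)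
          = (d.insert "CAN" (d.getD "CAN" 0 + ((p :: ps).map (fun q => d.getD q 0)).sum)).erase p := by
        rw [hgC, hmap, hd', ← pvErase_insert_comm _ _ hpC, PySem.Dict.insert_insert_self]
        simp [hv, add_assoc]
      rw [hins]

-- sum over all of l equals sum over the contained elements only (absent keys contribute 0)
theorem pvSum_filter_contains (l : List String) (d : PySem.Dict String Int) :
    ((l.filter (fun p => d.contains p)).map (fun p => d.getD p 0)).sum
      = (l.map (fun p => d.getD p 0)).sum := by
  induction l with
  | nil => rfl
  | cons a l ih =>
    by_cases hc : d.contains a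
    · simp [hc, ih]
    · simp only [Bool.not_eq_true] at hc
      simp [List.filter_cons, hc, ih, PySem.Dict.getD_of_not_contains d 0 hc]

theorem convertToCanada_spec_aux (state_map : List (String × Int))
    (hpre : (state_map.map Prod.fst).Nodup) :
    convertToCanada state_map = convertToCanada_alt state_map := by
  set d0 : PySem.Dict String Int := (PySem.Dict.mk state_map).insert "CAN" 0 with hd0
  have hmk : (PySem.Dict.mk state_map).keys.Nodup := by
    simpa [PySem.Dict.keys] using hpre
  have hnd0 : d0.keys.Nodup := PySem.Dict.nodup_keys_insert _ "CAN" 0 hmk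
  have hC0 : d0.contains "CAN" = true := PySem.Dict.contains_insert_self _ "CAN" 0
  have hprovnd : pvProvincesA.Nodup := by decide
  have hprovC : "CAN" ∉ pvProvincesA := by decide
  -- the B-side pieces
  set found := d0.keys.filter (fun k => pvProvSet.contains k) with hfound
  -- membership in found / in pvProvincesA agree on keys of d0
  have hmemprov : ∀ s : String, pvProvSet.contains s = pvProvincesA.contains s := by
    intro s
    have hps : (pvProvSet : List String) = pvProvincesA := by decide
    simp [PySem.Set.contains, hps]
  -- (i) the two totals agree
  have htot : (found.map (fun k => d0.getD k 0)).sum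
      = (pvProvincesA.map (fun p => d0.getD p 0)).sum := by
    rw [← pvSum_filter_contains pvProvincesA d0]
    have hperm : found.Perm (pvProvincesA.filter (fun p => d0.contains p)) := by
      refine List.perm_of_nodup_nodup_toFinset_eq (hnd0.filter _) (hprovnd.filter _) ?_
      ext s
      simp only [List.mem_toFinset, List.mem_filter, hfound]
      constructor
      · rintro ⟨hk, hp⟩
        rw [hmemprov] at hp
        exact ⟨by simpa using hp, (PySem.Dict.contains_iff_mem_keys d0 s).mpr hk⟩
      · rintro ⟨hp, hc⟩
        refine ⟨(PySem.Dict.contains_iff_mem_keys d0 s).mp hc, ?_⟩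
        rw [hmemprov]; simpa using hp
    exact (hperm.map _).sum_eq
  -- unfold both ports to a filter of the same items list
  show (pvProvincesA.foldl pvStepA d0).items = _
  rw [pvFoldA pvProvincesA d0 hnd0 hC0 hprovC hprovnd]
  have hg0 : d0.getD "CAN" 0 = 0 := PySem.Dict.getD_insert_self _ "CAN" 0 0
  rw [pvFoldl_erase_items, hg0, zero_add]
  show _ = (found.foldl (fun d k => d.erase k)
      (d0.insert "CAN" ((found.map (fun k => d0.getD k 0)).sum))).items
  rw [pvFoldl_erase_items, htot]
  refine List.filter_congr (fun q hq => ?_)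
  have hqk : q.1 ∈ d0.keys :=
    (PySem.Dict.keys_insert_of_contains d0 _ hC0) ▸ PySem.Dict.mem_keys_of_mem_items _ hq
  have : found.contains q.1 = pvProvincesA.contains q.1 := by
    simp only [hfound, List.contains_eq_mem, List.mem_filter, decide_eq_decide]
    constructor
    · rintro ⟨_, hp⟩; rw [hmemprov] at hp; simpa using hp
    · intro hp
      exact ⟨hqk, by rw [hmemprov]; simpa using hp⟩
  rw [this]

-- ===== VERDICT (by name: the statement is the Claim_ definition above) =====
theorem convertToCanada_spec : Claim_equal_convertToCanada := by
  intro state_map _ hpre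
  exact convertToCanada_spec_aux state_map hpre
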